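-- pv_equiv track=rewrite | github.com/miliar/Code_Jam_Webscraper | solutions_python/solutions_year15_round0_nr1/1462.py | solve
-- ===== SOURCE A (Python) =====
-- def solve(smax, kList):
--     f = 0
--     total = int(kList[0])
--     for i in range(1, len(kList)):
--         p = int(kList[i])
--
--         if(total < i):
--             diff = i - total
--             f += diff
--             total += diff
--         total += p
--     return f
-- ===== SOURCE B (Python) =====
-- def solve(smax, kList):
--     # Reduction to maximum prefix sum: each person at position i needs the
--     # running count to reach i, i.e. the answer is the maximum prefix sum of
--     # the increment sequence 1 - int(x) (last element never matters), floored at 0.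
--     steps = [1 - int(x) for x in kList]
--     best = 0
--     s = 0
--     for v in steps[:-1]:
--         s += v
--         if best < s:
--             best = s
--     return best
-- ===== Notes on version B (the rewrite author's own statement) =====
-- stated objective: alternative
-- what changed: A runs an indexed loop maintaining a coupled adjusted total and a correction counter f that it bumps whenever the total falls behind the index; B reduces the task to a maximum-prefix-sum problem: a staged pass maps each element to the increment 1 - int(x), drops the last, and a second pass takes the maximum prefix sum (floored at 0) of that list, with no index variable and no running sum of the raw values.
import Mathlib
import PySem

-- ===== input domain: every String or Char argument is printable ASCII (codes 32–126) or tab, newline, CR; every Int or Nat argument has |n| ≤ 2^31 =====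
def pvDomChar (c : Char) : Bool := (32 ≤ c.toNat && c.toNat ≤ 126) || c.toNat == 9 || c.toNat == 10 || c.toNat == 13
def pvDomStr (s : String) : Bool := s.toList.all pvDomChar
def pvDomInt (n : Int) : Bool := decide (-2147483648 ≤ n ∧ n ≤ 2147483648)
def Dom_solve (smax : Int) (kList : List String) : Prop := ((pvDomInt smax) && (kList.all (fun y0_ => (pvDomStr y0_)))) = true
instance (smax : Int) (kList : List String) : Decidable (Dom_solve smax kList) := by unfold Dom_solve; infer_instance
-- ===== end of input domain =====

-- B reduces the task to a maximum-prefix-sum problem over the increments 1 - int(x),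
-- instead of A's indexed loop with a coupled adjusted total and correction counter.

-- int(s) with a default never hit on inputs satisfying Pre_solve
def pvParse (s : String) : Int := (PySem.Int.ofStr? s).getD 0

-- int(kList[i]); the default index is never hit on inputs satisfying Pre_solve
def pvElem (kList : List String) (i : Int) : Int := pvParse (PySem.List.pyGetD kList i "")

-- ===== PORT A =====
def solve (smax : Int) (kList : List String) : Int :=
  let total0 := pvElem kList 0
  let st := (PySem.List.pyRange 1 (kList.length : Int) 1).foldl
    (fun (st : Int × Int) i =>
      let p := pvElem kList i
      if st.2 < i then (st.1 + (i - st.2), st.2 + (i - st.2) + p) else (st.1, st.2 + p))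
    (0, total0)
  st.1

-- ===== PORT B =====
def solve_alt (smax : Int) (kList : List String) : Int :=
  let steps := kList.map (fun x => 1 - pvParse x)
  let st := (PySem.List.slice steps none (some (-1))).foldl
    (fun (st : Int × Int) v =>
      let s := st.2 + v
      (if st.1 < s then s else st.1, s))
    (0, 0)
  st.1

-- ===== PRECONDITION & SPEC =====
-- A raises IndexError on an empty list (kList[0]) and ValueError when some entry is not int()-parsable; Pre_ excludes exactly those.
def Pre_solve (smax : Int) (kList : List String) : Prop :=
  kList ≠ [] ∧ ∀ s ∈ kList, (PySem.Int.ofStr? s).isSome = true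
instance (smax : Int) (kList : List String) : Decidable (Pre_solve smax kList) := by unfold Pre_solve; infer_instance

def pvWitness_solve : Int × List String := (10, ["3", "1", "4", "1"])

def Spec_solve (smax : Int) (kList : List String) (out : Int) : Prop := out = solve_alt smax kList
instance (smax : Int) (kList : List String) (out : Int) : Decidable (Spec_solve smax kList out) := by unfold Spec_solve; infer_instance

-- ===== CLAIM (what is proved, stated in full; the proofs are below) =====
def Claim_equal_solve : Prop := ∀ (smax : Int) (kList : List String), Dom_solve smax kList → Pre_solve smax kList → Spec_solve smax kList (solve smax kList)

-- ===== LEMMAS AND PROOFS =====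

-- Step 1: A's coupled (f, adjusted total) loop computes the same first component as a
-- max-deficit loop: A's state is (f, run + f) when the deficit loop's state is (f, run).
theorem pvLoop_eq (g : Int → Int) (idxs : List Int) : ∀ (f r : Int),
    (idxs.foldl
      (fun (st : Int × Int) i =>
        if st.2 < i then (st.1 + (i - st.2), st.2 + (i - st.2) + g i) else (st.1, st.2 + g i))
      (f, r + f)).1
  = (idxs.foldl (fun (st : Int × Int) i => (max st.1 (i - st.2), st.2 + g i)) (f, r)).1 := by
  induction idxs with
  | nil => intro f r; rfl
  | cons i rest ih =>
    intro f r
    simp only [List.foldl_cons]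
    by_cases h : r + f < i
    · rw [if_pos h]
      have hm : max f (i - r) = i - r := by omega
      have hf : f + (i - (r + f)) = i - r := by ring
      have ht : r + f + (i - (r + f)) + g i = (r + g i) + (i - r) := by ring
      rw [hm, hf, ht, ih (i - r) (r + g i)]
    · rw [if_neg h]
      have hm : max f (i - r) = f := by omega
      have ht : r + f + g i = (r + g i) + f := by ring
      rw [hm, ht, ih f (r + g i)]

-- Step 2: over consecutive indices, the max-deficit loop equals a compare-then-add
-- maximum-prefix-sum loop on the increments 1 - g j, with s tracking i - r.
theorem pvDeficit_eq_cta (g : Int → Int) : ∀ (n : Nat) (i f r : Int),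
    ((PySem.List.pyRange i (i + (n : Int)) 1).foldl
      (fun (st : Int × Int) j => (max st.1 (j - st.2), st.2 + g j)) (f, r)).1
  = ((PySem.List.pyRange i (i + (n : Int)) 1).foldl
      (fun (st : Int × Int) j => (max st.1 st.2, st.2 + (1 - g j))) (f, i - r)).1 := by
  intro n
  induction n with
  | zero => intro i f r; simp [PySem.List.pyRange_one_eq_nil]
  | succ m ih =>
    intro i f r
    have hlt : i < i + ((m + 1 : Nat) : Int) := by push_cast; omega
    rw [PySem.List.pyRange_one_cons hlt]
    simp only [List.foldl_cons]
    have harg : i + ((m + 1 : Nat) : Int) = (i + 1) + ((m : Nat) : Int) := by push_cast; ring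
    rw [harg, ih (i + 1) (max f (i - r)) (r + g i)]
    have hs : (i + 1) - (r + g i) = (i - r) + (1 - g i) := by ring
    rw [hs]

-- Step 3 (rotation): B's add-then-compare loop over (w0 :: ws) with the last element
-- dropped equals the compare-then-add loop over ws started at s + w0.
theorem pvRot (ws : List Int) : ∀ (w0 f s : Int),
    (((w0 :: ws).dropLast).foldl
      (fun (st : Int × Int) v =>
        let s' := st.2 + v
        (if st.1 < s' then s' else st.1, s')) (f, s)).1
  = (ws.foldl (fun (st : Int × Int) w => (max st.1 st.2, st.2 + w)) (f, s + w0)).1 := by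
  induction ws with
  | nil => intro w0 f s; rfl
  | cons w1 rest ih =>
    intro w0 f s
    simp only [List.dropLast_cons₂, List.foldl_cons]
    rw [ih w1 (if f < s + w0 then s + w0 else f) (s + w0)]
    have : (if f < s + w0 then s + w0 else f) = max f (s + w0) := by
      by_cases h : f < s + w0 <;> simp [h] <;> omega
    rw [this]

-- ===== VERDICT (by name: the statements are the Claim_ definitions above) =====
theorem solve_spec : Claim_equal_solve := by
  intro smax kList _ hpre
  obtain ⟨hne, -⟩ := hpre
  obtain ⟨x0, rest, rfl⟩ := List.exists_cons_of_ne_nil hne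
  unfold Spec_solve solve solve_alt
  simp only []
  -- A side: coupled loop → max-deficit loop
  have h1 := pvLoop_eq (fun i => pvElem (x0 :: rest) i)
      (PySem.List.pyRange 1 ((x0 :: rest).length : Int) 1) 0 (pvElem (x0 :: rest) 0)
  simp only [add_zero] at h1
  rw [h1]
  -- max-deficit loop → compare-then-add max-prefix-sum loop over increments
  have hlen : (((x0 :: rest).length : Nat) : Int) = 1 + ((rest.length : Nat) : Int) := by
    simp [List.length_cons]; ring
  have h2 := pvDeficit_eq_cta (fun j => pvElem (x0 :: rest) j) rest.length 1 0
      (pvElem (x0 :: rest) 0)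
  rw [hlen, h2]
  -- fold over indices with pyGetD → fold over the dropped tail of the list
  have h3 := PySem.List.foldl_pyRange_pyGetD (xs := x0 :: rest) (a := 1)
      (f := fun (st : Int × Int) (x : String) => (max st.1 st.2, st.2 + (1 - pvParse x)))
      (d := "") (init := ((0 : Int), 1 - pvElem (x0 :: rest) 0)) (by omega)
  have hlen2 : PySem.List.len (x0 :: rest) = 1 + (rest.length : Int) := by
    simp [PySem.List.len]; ring
  rw [hlen2] at h3
  simp only [pvElem] at h3 ⊢
  rw [h3]
  -- B side: slice [:-1] is dropLast; fold over mapped list is fold over increments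
  rw [PySem.List.slice_to_neg_one]
  have hsteps : (x0 :: rest).map (fun x => 1 - pvParse x)
      = (1 - pvParse x0) :: rest.map (fun x => 1 - pvParse x) := by simp
  rw [hsteps]
  have h4 := pvRot (rest.map (fun x => 1 - pvParse x)) (1 - pvParse x0) 0 0
  rw [h4, List.foldl_map]
  simp
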